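-- pv_equiv track=rewrite | github.com/devsacti/Algorithms | Algorithms/python/algorithmjobs/L2/L226.py | checkcntsame
-- ===== SOURCE A (Python) =====
-- def checkcntsame(seq):
--     cnt_same = 0
--     std = seq[0]
--     maxval = seq[0]
--
--     for element in seq:
--         if (std == element):
--             cnt_same += 1
--         else:
--             std = element
--             if(cnt_same==1):
--                 cnt_same = 0
--
--             if (std > maxval):
--                 maxval = std
--
--     return cnt_same, maxval
-- ===== SOURCE B (Python) =====
-- def checkcntsame(seq):
--     maxval = max(seq)
--     # run-length encode the sequence
--     runs = []
--     i, n = 0, len(seq)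
--     while i < n:
--         j = i
--         while j < n and seq[j] == seq[i]:
--             j += 1
--         runs.append(j - i)
--         i = j
--     # fold the boundary rule over the run lengths
--     cnt = runs[0]
--     for r in runs[1:]:
--         if cnt == 1:
--             cnt = 0
--         cnt += r - 1
--     return cnt, maxval
-- ===== Notes on version B (the rewrite author's own statement) =====
-- stated objective: alternative
-- what changed: Replaces A's single stateful loop (cnt_same/std/maxval juggled together) by the builtin max(seq) plus a run-length encoding pass whose lengths are folded with the boundary rule (reset cnt if 1, add len-1); same O(n) cost, separated concerns.
import Mathlib
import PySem

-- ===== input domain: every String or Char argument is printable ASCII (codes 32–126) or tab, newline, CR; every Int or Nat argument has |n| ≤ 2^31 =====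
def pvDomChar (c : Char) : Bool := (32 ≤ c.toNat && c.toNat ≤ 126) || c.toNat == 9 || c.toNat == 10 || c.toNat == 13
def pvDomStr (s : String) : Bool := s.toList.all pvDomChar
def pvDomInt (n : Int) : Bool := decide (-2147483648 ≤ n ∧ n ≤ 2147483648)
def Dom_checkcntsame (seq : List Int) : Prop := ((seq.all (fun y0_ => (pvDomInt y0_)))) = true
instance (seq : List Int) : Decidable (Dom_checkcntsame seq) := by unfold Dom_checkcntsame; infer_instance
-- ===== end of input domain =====

-- B replaces A's single stateful loop by max(seq) plus a run-length encoding folded with the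
-- boundary rule (objective: alternative decomposition, same cost). Equivalence of return values only.

-- ===== PORT A =====
-- A's loop body: state (cnt_same, std, maxval)
def chkStep (s : Int × Int × Int) (x : Int) : Int × Int × Int :=
  if s.2.1 = x then (s.1 + 1, s.2.1, s.2.2)
  else ((if s.1 = 1 then 0 else s.1), x, (if x > s.2.2 then x else s.2.2))

def checkcntsame (seq : List Int) : Int × Int :=
  match seq with
  | [] => (0, 0)  -- Python raises IndexError on seq[0]; excluded by Pre_
  | x :: xs =>
    let s := List.foldl chkStep (0, x, x) (x :: xs)
    (s.1, s.2.2)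

-- ===== PORT B =====
-- run-length encoding: the inner while scanning one run is the takeWhile/dropWhile split
def runsOf : List Int → List Int
  | [] => []
  | x :: xs =>
    (1 + (xs.takeWhile (fun y => y = x)).length : Int) ::
      runsOf (xs.dropWhile (fun y => y = x))
termination_by xs => xs.length
decreasing_by
  simpa using Nat.lt_succ_of_le (List.length_dropWhile_le _ _)

def cntStep (c r : Int) : Int := (if c = 1 then 0 else c) + (r - 1)

def checkcntsame_alt (seq : List Int) : Int × Int :=
  match PySem.List.max? seq (fun y => y) with
  | none => (0, 0)  -- Python: max([]) raises ValueError; excluded by Pre_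
  | some m =>
    match runsOf seq with
    | [] => (0, 0)  -- unreachable (seq nonempty here)
    | r0 :: rest => (rest.foldl cntStep r0, m)

-- ===== PRECONDITION & SPEC =====
-- A raises IndexError on the empty list (B's max raises ValueError there too)
def Pre_checkcntsame (seq : List Int) : Prop := seq ≠ []
instance (seq : List Int) : Decidable (Pre_checkcntsame seq) := by unfold Pre_checkcntsame; infer_instance
def pvWitness_checkcntsame : List Int := [2, 2, 5, 3, 3]

def Spec_checkcntsame (seq : List Int) (out : Int × Int) : Prop := out = checkcntsame_alt seq
instance (seq : List Int) (out : Int × Int) : Decidable (Spec_checkcntsame seq out) := by unfold Spec_checkcntsame; infer_instance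

-- ===== CLAIM (what is proved, stated in full; the proofs are below) =====
def Claim_equal_checkcntsame : Prop := ∀ (seq : List Int), Dom_checkcntsame seq → Pre_checkcntsame seq → Spec_checkcntsame seq (checkcntsame seq)

-- ===== LEMMAS AND PROOFS =====

-- A's count component equals B's fold over the run lengths, for any loop state.
theorem cnt_lemma : ∀ (xs : List Int) (v c m : Int),
    (List.foldl chkStep (c, v, m) xs).1 =
      List.foldl cntStep (c + ((xs.takeWhile (fun y => y = v)).length : Int))
        (runsOf (xs.dropWhile (fun y => y = v))) := by
  intro xs
  induction xs with
  | nil => intro v c m; simp [runsOf]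
  | cons x xs ih =>
    intro v c m
    by_cases h : x = v
    · subst h
      simp only [List.foldl_cons, chkStep, List.takeWhile_cons, List.dropWhile_cons,
        decide_true, if_true, List.length_cons]
      rw [ih]
      congr 1
      push_cast
      ring
    · have hvx : v ≠ x := fun h' => h h'.symm
      have hd : (decide (x = v)) = false := by simp [h]
      simp only [List.foldl_cons, chkStep, if_neg hvx, List.takeWhile_cons, List.dropWhile_cons,
        hd, Bool.false_eq_true, if_false]
      rw [ih, runsOf]
      simp only [List.foldl_cons, cntStep, List.length_nil]
      congr 1
      split_ifs <;> push_cast <;> omega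

-- A's max component is the running max, given the invariant std ≤ maxval.
theorem max_lemma : ∀ (xs : List Int) (v c m : Int), v ≤ m →
    (List.foldl chkStep (c, v, m) xs).2.2 = xs.foldl max m := by
  intro xs
  induction xs with
  | nil => intro v c m _; simp
  | cons x xs ih =>
    intro v c m hvm
    by_cases h : v = x
    · subst h
      simp only [List.foldl_cons, chkStep, if_true]
      rw [ih _ _ _ hvm]
      have : max m v = m := max_eq_left hvm
      simp [this]
    · simp only [List.foldl_cons, chkStep, if_neg h]
      rw [ih]
      · congr 1
        by_cases hx : x > m
        · simp [hx, max_eq_right (le_of_lt hx)]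
        · simp [hx, max_eq_left (not_lt.mp hx)]
      · by_cases hx : x > m
        · simp [hx]
        · simpa [hx] using le_of_not_gt hx

-- ===== VERDICT (by name: the statement is the Claim_ definition above) =====
theorem checkcntsame_spec : Claim_equal_checkcntsame := by
  intro seq _ hpre
  unfold Spec_checkcntsame
  match seq with
  | [] => exact absurd rfl hpre
  | x :: xs =>
    unfold checkcntsame checkcntsame_alt
    rw [PySem.List.max?_id_cons]
    simp only [runsOf]
    have hstep : List.foldl chkStep (0, x, x) (x :: xs) = List.foldl chkStep (1, x, x) xs := by
      simp [chkStep]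
    rw [hstep, cnt_lemma, max_lemma xs x 1 x le_rfl]
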